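-- pv_equiv track=rewrite | github.com/AIlhomov/Aalto_CP_course | ncpc_training/coinstacks.py | findTwoRandom
-- ===== SOURCE A (Python) =====
-- def findTwoRandom(a):
--     findIndex1 = findIndex2 = -1
--
--     for i, v in enumerate(a):
--         if v <= 0:
--             continue
--         if findIndex1 == -1 or v > a[findIndex1]:
--             findIndex2 = findIndex1
--             findIndex1 = i
--         elif findIndex2 == -1 or v > a[findIndex2]:
--             findIndex2 = i
--     return findIndex1, findIndex2
-- ===== SOURCE B (Python) =====
-- def findTwoRandom(a):
--     idx = [i for i in range(len(a)) if a[i] > 0]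
--     idx.sort(key=lambda i: -a[i])
--     return (idx[0] if idx else -1, idx[1] if len(idx) >= 2 else -1)
-- ===== Notes on version B (the rewrite author's own statement) =====
-- stated objective: simpler
-- what changed: Replaces A's streaming two-accumulator scan with overwrite/shift logic by collecting the positive indices, stable-sorting them by descending value, and taking the first two (padded with -1).
import Mathlib
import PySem

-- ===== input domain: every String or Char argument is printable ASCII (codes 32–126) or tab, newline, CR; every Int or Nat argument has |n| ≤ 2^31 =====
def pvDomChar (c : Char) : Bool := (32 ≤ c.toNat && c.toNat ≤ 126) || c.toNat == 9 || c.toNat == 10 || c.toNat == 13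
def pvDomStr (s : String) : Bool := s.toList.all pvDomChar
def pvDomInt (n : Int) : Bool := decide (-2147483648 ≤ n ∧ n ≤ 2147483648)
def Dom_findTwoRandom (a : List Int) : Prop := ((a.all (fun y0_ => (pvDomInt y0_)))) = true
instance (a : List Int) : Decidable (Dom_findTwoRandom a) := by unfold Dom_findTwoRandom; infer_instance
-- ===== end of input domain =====

-- B replaces A's streaming two-accumulator scan by filter-the-positive-indices,
-- stable-sort by descending value, take the first two (pad with -1): simpler, same O(n log n)/O(n) ballpark, not claimed faster.

-- ===== PORT A =====
def findTwoRandom (a : List Int) : Int × Int :=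
  (PySem.List.enumerate a).foldl
    (fun s iv =>
      if iv.2 ≤ 0 then s
      else if s.1 = -1 ∨ PySem.List.pyGetD a s.1 0 < iv.2 then (iv.1, s.1)
      else if s.2 = -1 ∨ PySem.List.pyGetD a s.2 0 < iv.2 then (s.1, iv.1)
      else s)
    (-1, -1)

-- ===== PORT B =====
def findTwoRandom_alt (a : List Int) : Int × Int :=
  let idx := (PySem.List.pyRange 0 (a.length : Int)).filter
      (fun i => decide (0 < PySem.List.pyGetD a i 0))
  let s := PySem.List.sorted idx (fun i => -(PySem.List.pyGetD a i 0))
  ((match s with | i :: _ => i | [] => -1),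
   (match s with | _ :: j :: _ => j | _ => -1))

-- ===== PRECONDITION & SPEC =====
def Spec_findTwoRandom (a : List Int) (out : Int × Int) : Prop := out = findTwoRandom_alt a
instance (a : List Int) (out : Int × Int) : Decidable (Spec_findTwoRandom a out) := by unfold Spec_findTwoRandom; infer_instance

-- ===== CLAIM (what is proved, stated in full; the proofs are below) =====
def Claim_equal_findTwoRandom : Prop := ∀ (a : List Int), Dom_findTwoRandom a → Spec_findTwoRandom a (findTwoRandom a)

-- ===== LEMMAS AND PROOFS =====

-- A's loop body, as a named step function
def pvStepA (a : List Int) (s : Int × Int) (iv : Int × Int) : Int × Int :=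
  if iv.2 ≤ 0 then s
  else if s.1 = -1 ∨ PySem.List.pyGetD a s.1 0 < iv.2 then (iv.1, s.1)
  else if s.2 = -1 ∨ PySem.List.pyGetD a s.2 0 < iv.2 then (s.1, iv.1)
  else s

-- B's insertion step (the one sorted_eq_foldl_insertBy produces)
def pvStepB (a : List Int) (acc : List Int) (i : Int) : List Int :=
  PySem.List.insertBy
    (fun p q => decide ((-(PySem.List.pyGetD a p 0) : Int) < -(PySem.List.pyGetD a q 0))) i acc

-- first two elements, padded with -1
def pvTop2 (s : List Int) : Int × Int :=
  ((match s with | i :: _ => i | [] => -1),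
   (match s with | _ :: j :: _ => j | _ => -1))

theorem pvStep_comm (a : List Int) (s : List Int) (x v : Int)
    (hs : ∀ i ∈ s, 0 ≤ i) (hv : 0 < v)
    (hlook : PySem.List.pyGetD a x 0 = v) :
    pvStepA a (pvTop2 s) (x, v) = pvTop2 (pvStepB a s x) := by
  match s with
  | [] =>
    simp [pvStepA, pvStepB, pvTop2, PySem.List.insertBy, not_le.mpr hv]
  | [s0] =>
    have hs0 : (0:Int) ≤ s0 := hs s0 (by simp)
    by_cases h0 : PySem.List.pyGetD a s0 0 < v
    · simp [pvStepA, pvStepB, pvTop2, PySem.List.insertBy, not_le.mpr hv, hlook, h0]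
    · simp [pvStepA, pvStepB, pvTop2, PySem.List.insertBy, not_le.mpr hv, hlook, h0]
      omega
  | s0 :: s1 :: rest =>
    have hs0 : (0:Int) ≤ s0 := hs s0 (by simp)
    have hs1 : (0:Int) ≤ s1 := hs s1 (by simp)
    by_cases h0 : PySem.List.pyGetD a s0 0 < v
    · simp [pvStepA, pvStepB, pvTop2, PySem.List.insertBy, not_le.mpr hv, hlook, h0]
    · by_cases h1 : PySem.List.pyGetD a s1 0 < v
      · simp [pvStepA, pvStepB, pvTop2, PySem.List.insertBy, not_le.mpr hv, hlook, h0, h1]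
        omega
      · simp [pvStepA, pvStepB, pvTop2, PySem.List.insertBy, not_le.mpr hv, hlook, h0, h1]
        rw [if_neg (by omega : ¬ s0 = -1), if_neg (by omega : ¬ s1 = -1)]

theorem pvMain (a : List Int) : ∀ (l : List Int) (n : Int) (s : List Int),
    0 ≤ n → (∀ i ∈ s, 0 ≤ i) →
    (∀ k : Nat, (hk : k < l.length) → PySem.List.pyGetD a (n + (k : Int)) 0 = l[k]) →
    (PySem.List.enumerate l n).foldl (pvStepA a) (pvTop2 s) =
      pvTop2 (((PySem.List.pyRange n (n + (l.length : Int))).filter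
        (fun i => decide (0 < PySem.List.pyGetD a i 0))).foldl (pvStepB a) s) := by
  intro l
  induction l with
  | nil =>
    intro n s _ _ _
    simp [PySem.List.enumerate, PySem.List.pyRange]
  | cons v t ih =>
    intro n s hn hs hlook
    have hv0 : PySem.List.pyGetD a n 0 = v := by simpa using hlook 0 (by simp)
    have hrange : PySem.List.pyRange n (n + ((v :: t).length : Int)) =
        n :: PySem.List.pyRange (n + 1) ((n + 1) + (t.length : Int)) := by
      have he : n + (((v :: t).length : Nat) : Int) = (n + 1) + (t.length : Int) := by
        simp only [List.length_cons]; push_cast; ring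
      rw [he, PySem.List.pyRange_one_cons (by
        have : (0:Int) ≤ (t.length : Int) := by positivity
        omega)]
    have henum : PySem.List.enumerate (v :: t) n = (n, v) :: PySem.List.enumerate t (n + 1) := rfl
    have hlook' : ∀ k : Nat, (hk : k < t.length) →
        PySem.List.pyGetD a ((n + 1) + (k : Int)) 0 = t[k] := by
      intro k hk
      have := hlook (k + 1) (by simp; omega)
      simpa [add_assoc, add_comm, add_left_comm] using this
    rw [henum, hrange]
    by_cases hpos : 0 < v
    · have hstep : pvStepA a (pvTop2 s) (n, v) = pvTop2 (pvStepB a s n) :=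
        pvStep_comm a s n v hs hpos hv0
      rw [List.foldl_cons, hstep, List.filter_cons_of_pos (by simp [hv0, hpos])]
      exact ih (n + 1) (pvStepB a s n) (by omega)
        (by
          intro i hi
          rcases (PySem.List.mem_insertBy _ _ _ _).mp hi with h | h
          · omega
          · exact hs i h)
        hlook'
    · have hA : pvStepA a (pvTop2 s) (n, v) = pvTop2 s := by
        simp [pvStepA, (show v ≤ 0 by omega)]
      have hfilt : (decide (0 < PySem.List.pyGetD a n 0)) = false := by
        simp [hv0]; omega
      rw [List.foldl_cons, hA, List.filter_cons_of_neg (by simp [hv0]; omega)]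
      exact ih (n + 1) s (by omega) hs hlook'

-- ===== VERDICT (by name: the statement is the Claim_ definition above) =====
theorem findTwoRandom_spec : Claim_equal_findTwoRandom := by
  intro a _
  show findTwoRandom a = findTwoRandom_alt a
  have h := pvMain a a 0 [] le_rfl (by simp) (by
    intro k hk
    simp [PySem.List.pyGetD_natCast, hk])
  have h' : List.foldl (pvStepA a) (pvTop2 []) (PySem.List.enumerate a) =
      pvTop2 (((PySem.List.pyRange 0 (a.length : Int)).filter
        (fun i => decide (0 < PySem.List.pyGetD a i 0))).foldl (pvStepB a) []) := by
    simpa using h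
  unfold findTwoRandom findTwoRandom_alt
  simp only [PySem.List.sorted_eq_foldl_insertBy]
  exact h'
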